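-- pv_equiv track=rewrite | github.com/mohamedahmed-cloud/Problem-Solving | Mostafa Saad/C1/The Child and Set.py | TwoDArray
-- ===== SOURCE A (Python) =====
-- def TwoDArray (sum,limit):
--     arr = []
--     for i in range(limit,0,-1):
--         count = 0
--         constant = i
--         while constant % 2 != 1:
--             constant = constant // 2
--             count += 1
--         temp = [i, 2 ** count]
--         arr.append(temp)
--     return arr
-- ===== SOURCE B (Python) =====
-- def TwoDArray(sum, limit):
--     # Sieve: ans[m] accumulates one doubling per power of two dividing m.
--     ans = [1] * (limit + 1)
--     p = 2
--     while p <= limit: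
--         m = p
--         while m <= limit:
--             ans[m] *= 2
--             m += p
--         p *= 2
--     return [[i, ans[i]] for i in range(limit, 0, -1)]
-- ===== Notes on version B (the rewrite author's own statement) =====
-- stated objective: alternative
-- what changed: Replaces the per-element trailing-zero while-loop (recomputing 2^v2(i) for every i) with a sieve table accumulating one doubling per power of two over its multiples, then a single emit pass.
import Mathlib
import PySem

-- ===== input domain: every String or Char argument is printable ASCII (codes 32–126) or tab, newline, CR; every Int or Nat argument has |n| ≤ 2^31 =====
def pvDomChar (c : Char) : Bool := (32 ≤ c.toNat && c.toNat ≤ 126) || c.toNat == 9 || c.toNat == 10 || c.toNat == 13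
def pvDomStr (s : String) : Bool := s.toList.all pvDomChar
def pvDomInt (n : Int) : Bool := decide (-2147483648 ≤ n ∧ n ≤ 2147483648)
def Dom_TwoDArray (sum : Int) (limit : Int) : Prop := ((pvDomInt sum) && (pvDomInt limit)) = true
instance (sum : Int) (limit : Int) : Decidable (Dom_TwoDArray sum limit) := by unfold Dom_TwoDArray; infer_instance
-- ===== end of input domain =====

-- B replaces A's per-element trailing-zero loop by a sieve table (one doubling pass per
-- power of two over its multiples), then emits pairs in the same descending order:
-- an alternative algorithm of similar measured cost.

-- ===== PORT A =====
-- Python's 'while constant % 2 != 1: constant //= 2; count += 1' loop, carrying count.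
-- The '0 < constant' conjunct is a termination guard only; every call site has constant = i ≥ 1.
def countTwos (constant : Int) (count : Int) : Int :=
  if _h : PySem.Int.mod constant 2 ≠ 1 ∧ 0 < constant then
    countTwos (PySem.Int.floordiv constant 2) (count + 1)
  else count
termination_by constant.toNat
decreasing_by
  rw [PySem.Int.floordiv_eq_ediv_of_pos (by norm_num)]
  omega

def TwoDArray (sum : Int) (limit : Int) : List (List Int) :=
  -- for i in range(limit, 0, -1): arr.append([i, 2 ** count]); count ≥ 0 so toNat is exact
  (PySem.List.pyRange limit 0 (-1)).foldl
    (fun arr i => arr ++ [[i, (2:Int) ^ (countTwos i 0).toNat]]) []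

-- ===== PORT B =====
-- inner 'while m <= limit: ans[m] *= 2; m += p'; '0 < p' is a termination guard only (p ≥ 2).
-- ans[m] is always in range (0 < m ≤ limit < len ans), so set/getD are exact here.
def sieveInner (limit p m : Int) (ans : List Int) : List Int :=
  if _h : m ≤ limit ∧ 0 < p then
    sieveInner limit p (m + p) (ans.set m.toNat (ans.getD m.toNat 0 * 2))
  else ans
termination_by (limit + 1 - m).toNat
decreasing_by omega

-- outer 'while p <= limit: …; p *= 2'; '2 ≤ p' is a termination guard only (p starts at 2, doubles).
def sieveOuter (limit p : Int) (ans : List Int) : List Int :=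
  if _h : p ≤ limit ∧ 2 ≤ p then
    sieveOuter limit (p * 2) (sieveInner limit p p ans)
  else ans
termination_by (limit + 1 - p).toNat
decreasing_by omega

def TwoDArray_alt (sum : Int) (limit : Int) : List (List Int) :=
  let ans := sieveOuter limit 2 (List.replicate (limit + 1).toNat (1:Int))
  (PySem.List.pyRange limit 0 (-1)).map (fun i => [i, ans.getD i.toNat 0])

-- ===== PRECONDITION & SPEC =====
def Spec_TwoDArray (sum : Int) (limit : Int) (out : List (List Int)) : Prop := out = TwoDArray_alt sum limit
instance (sum : Int) (limit : Int) (out : List (List Int)) : Decidable (Spec_TwoDArray sum limit out) := by unfold Spec_TwoDArray; infer_instance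

-- ===== CLAIM (what is proved, stated in full; the proofs are below) =====
def Claim_equal_TwoDArray : Prop := ∀ (sum : Int) (limit : Int), Dom_TwoDArray sum limit → Spec_TwoDArray sum limit (TwoDArray sum limit)

-- ===== LEMMAS AND PROOFS =====

-- A's append-fold is a map
lemma foldl_append_map (l : List Int) (f : Int → List Int) :
    ∀ acc, l.foldl (fun arr i => arr ++ [f i]) acc = acc ++ l.map f := by
  induction l with
  | nil => simp
  | cons x xs ih => intro acc; simp [List.foldl, ih]

lemma countTwos_acc (c acc0 : Int) : ∀ acc, countTwos c acc = acc + countTwos c 0 := by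
  induction c, acc0 using countTwos.induct with
  | case1 c acc0 h ih =>
    intro acc
    rw [countTwos, dif_pos h, ih (acc + 1)]
    conv_rhs => rw [countTwos, dif_pos h, ih (0 + 1)]
    ring
  | case2 c acc0 h =>
    intro acc
    rw [countTwos, dif_neg h]
    conv_rhs => rw [countTwos, dif_neg h]
    ring

lemma countTwos_le (c0 acc0 : Int) : acc0 ≤ countTwos c0 acc0 := by
  induction c0, acc0 using countTwos.induct with
  | case1 c acc h ih =>
    rw [countTwos, dif_pos h]
    omega
  | case2 c acc h =>
    rw [countTwos, dif_neg h]

lemma countTwos_nonneg (c : Int) : 0 ≤ countTwos c 0 := countTwos_le c 0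

lemma countTwos_odd (t : Int) (h : ¬ (2 ∣ t)) : countTwos t 0 = 0 := by
  rw [countTwos, dif_neg]
  rw [PySem.Int.mod_eq_emod_of_pos (by norm_num)]
  intro hh
  exact hh.1 (by omega)

lemma countTwos_even (t : Int) (h : 1 ≤ t) : countTwos (2 * t) 0 = 1 + countTwos t 0 := by
  rw [countTwos, dif_pos]
  · have hf : PySem.Int.floordiv (2 * t) 2 = t := by
      rw [PySem.Int.floordiv_eq_ediv_of_pos (by norm_num)]
      omega
    rw [hf, countTwos_acc t t (0 + 1)]
    ring
  · constructor
    · rw [PySem.Int.mod_eq_emod_of_pos (by norm_num)]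
      omega
    · omega

-- the per-index doubling factor accumulated by the outer sieve loop from p upward
def levels (limit p m : Int) : Int :=
  if _h : p ≤ limit ∧ 2 ≤ p then
    (if p ∣ m then 2 else 1) * levels limit (p * 2) m
  else 1
termination_by (limit + 1 - p).toNat
decreasing_by omega

lemma length_sieveInner : ∀ (limit p m : Int) (ans : List Int), (sieveInner limit p m ans).length = ans.length := by
  intro limit p m ans
  induction m, ans using sieveInner.induct (limit := limit) (p := p) with
  | case1 m ans h ih =>
    rw [sieveInner, dif_pos h]
    simpa using ih
  | case2 m ans h =>
    rw [sieveInner, dif_neg h]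

lemma sieveInner_getD (limit p : Int) (hp : 0 < p) :
    ∀ (m : Int) (ans : List Int), ans.length = (limit + 1).toNat → ∀ (k : Int), 1 ≤ k → k ≤ limit →
    (sieveInner limit p m ans).getD k.toNat 0 =
      if m ≤ k ∧ p ∣ (k - m) then ans.getD k.toNat 0 * 2 else ans.getD k.toNat 0 := by
  intro m ans
  induction m, ans using sieveInner.induct (limit := limit) (p := p) with
  | case1 m ans h ih =>
    intro hlen k hk1 hk2
    rw [sieveInner, dif_pos h]
    have hlen' : (ans.set m.toNat (ans.getD m.toNat 0 * 2)).length = (limit + 1).toNat := by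
      simpa using hlen
    rw [ih hlen' k hk1 hk2]
    by_cases hkm : k = m
    · subst hkm
      have hnext : ¬ (k + p ≤ k ∧ p ∣ (k - (k + p))) := by
        intro hh; omega
      rw [if_neg hnext, if_pos ⟨le_refl k, by simp⟩]
      have hbound : k.toNat < ans.length := by omega
      rw [List.getD_eq_getElem?_getD]
      simp [hbound]
    · have hne : m.toNat ≠ k.toNat := by omega
      have hsame : (ans.set m.toNat (ans.getD m.toNat 0 * 2)).getD k.toNat 0 = ans.getD k.toNat 0 := by
        rw [List.getD_eq_getElem?_getD, List.getD_eq_getElem?_getD]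
        simp [hne]
      rw [hsame]
      have hiff : (m + p ≤ k ∧ p ∣ (k - (m + p))) ↔ (m ≤ k ∧ p ∣ (k - m)) := by
        constructor
        · rintro ⟨h1, c, hc⟩
          exact ⟨by omega, c + 1, by linarith⟩
        · rintro ⟨h1, hd⟩
          have hpos : 0 < k - m := by omega
          have hle : p ≤ k - m := Int.le_of_dvd hpos hd
          obtain ⟨c, hc⟩ := hd
          exact ⟨by omega, c - 1, by linarith⟩
      split_ifs with h1 h2 h2
      · rfl
      · exact absurd (hiff.mp h1) h2
      · exact absurd (hiff.mpr h2) h1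
      · rfl
  | case2 m ans h =>
    intro hlen k hk1 hk2
    rw [sieveInner, dif_neg h]
    have : ¬ (m ≤ k ∧ p ∣ (k - m)) := by
      intro hh; exact h ⟨by omega, hp⟩
    rw [if_neg this]

lemma sieveOuter_getD (limit : Int) :
    ∀ p (ans : List Int), 2 ≤ p → ans.length = (limit + 1).toNat → ∀ (k : Int), 1 ≤ k → k ≤ limit →
    (sieveOuter limit p ans).getD k.toNat 0 = ans.getD k.toNat 0 * levels limit p k := by
  intro p ans
  induction p, ans using sieveOuter.induct (limit := limit) with
  | case1 p ans h ih =>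
    intro hp2 hlen k hk1 hk2
    rw [sieveOuter, dif_pos h, levels, dif_pos ⟨h.1, hp2⟩]
    have hlen' : (sieveInner limit p p ans).length = (limit + 1).toNat := by
      rw [length_sieveInner]; exact hlen
    rw [ih (by omega) hlen' k hk1 hk2]
    rw [sieveInner_getD limit p (by omega) p ans hlen k hk1 hk2]
    have hiff : (p ≤ k ∧ p ∣ (k - p)) ↔ p ∣ k := by
      constructor
      · rintro ⟨h1, c, hc⟩
        exact ⟨c + 1, by linarith⟩
      · intro hd
        have hle : p ≤ k := Int.le_of_dvd (by omega) hd
        obtain ⟨c, hc⟩ := hd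
        exact ⟨hle, c - 1, by linarith⟩
    split_ifs with h1 h2 h2
    · ring
    · exact absurd (hiff.mp h1) h2
    · exact absurd (hiff.mpr h2) h1
    · ring
  | case2 p ans h =>
    intro hp2 hlen k hk1 hk2
    rw [sieveOuter, dif_neg h, levels, dif_neg h, mul_one]

lemma levels_eq_one (limit : Int) : ∀ p m, ¬ p ∣ m → levels limit p m = 1 := by
  intro p m
  induction p using levels.induct (limit := limit) with
  | case1 p h ih =>
    intro hnd
    rw [levels, dif_pos h, if_neg hnd, one_mul]
    exact ih (fun hd => hnd (dvd_trans (Dvd.intro 2 rfl) hd))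
  | case2 p h =>
    intro _
    rw [levels, dif_neg h]

lemma levels_pow_aux (limit : Int) :
    ∀ (n : Nat) (q m t : Int), (limit + 1 - 2 * q).toNat ≤ n → 1 ≤ q → m = q * t → 1 ≤ m → m ≤ limit →
    levels limit (2 * q) m = 2 ^ (countTwos t 0).toNat := by
  intro n
  induction n with
  | zero =>
    intro q m t hn hq hm hm1 hm2
    have hgt : ¬ (2 * q ≤ limit) := by omega
    have ht1 : 1 ≤ t := by nlinarith
    rw [levels, dif_neg (fun hh => hgt hh.1)]
    have hodd : ¬ (2 ∣ t) := by
      rintro ⟨t', ht'⟩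
      have ht'1 : 1 ≤ t' := by omega
      have hm' : m = 2 * q * t' := by rw [hm, ht']; ring
      nlinarith [mul_nonneg (show (0:Int) ≤ 2 * q by omega) (show (0:Int) ≤ t' - 1 by omega)]
    rw [countTwos_odd t hodd]
    rfl
  | succ n ihn =>
    intro q m t hn hq hm hm1 hm2
    have ht1 : 1 ≤ t := by nlinarith
    by_cases hc : 2 * q ≤ limit
    · rw [levels, dif_pos ⟨hc, by omega⟩]
      by_cases h2 : 2 ∣ t
      · obtain ⟨t', ht'⟩ := h2
        have ht'1 : 1 ≤ t' := by nlinarith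
        have hdvd : (2 * q) ∣ m := ⟨t', by rw [hm, ht']; ring⟩
        rw [if_pos hdvd]
        have harg : 2 * q * 2 = 2 * (2 * q) := by ring
        rw [harg, ihn (2 * q) m t' (by omega) (by omega) (by rw [hm, ht']; ring) hm1 hm2]
        rw [ht', countTwos_even t' ht'1]
        have hnn := countTwos_nonneg t'
        rw [show (1 + countTwos t' 0).toNat = 1 + (countTwos t' 0).toNat by omega,
          add_comm 1 ((countTwos t' 0).toNat), pow_succ]
        ring
      · have hndvd : ¬ (2 * q) ∣ m := by
          rintro ⟨c, hcq⟩
          exact h2 ⟨c, by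
            have hq0 : q ≠ 0 := by omega
            have : q * t = q * (2 * c) := by rw [← hm, hcq]; ring
            exact mul_left_cancel₀ hq0 this⟩
        rw [if_neg hndvd, one_mul]
        rw [levels_eq_one limit (2 * q * 2) m
          (fun hd => hndvd (dvd_trans (Dvd.intro 2 rfl) hd))]
        rw [countTwos_odd t h2]
        rfl
    · rw [levels, dif_neg (fun hh => hc hh.1)]
      have hodd : ¬ (2 ∣ t) := by
        rintro ⟨t', ht'⟩
        have ht'1 : 1 ≤ t' := by omega
        have hm' : m = 2 * q * t' := by rw [hm, ht']; ring
        nlinarith [mul_nonneg (show (0:Int) ≤ 2 * q by omega) (show (0:Int) ≤ t' - 1 by omega)]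
      rw [countTwos_odd t hodd]
      rfl

lemma levels_pow (limit : Int) :
    ∀ (q m t : Int), 1 ≤ q → m = q * t → 1 ≤ m → m ≤ limit →
    levels limit (2 * q) m = 2 ^ (countTwos t 0).toNat := by
  intro q m t hq hm hm1 hm2
  exact levels_pow_aux limit (limit + 1 - 2 * q).toNat q m t (le_refl _) hq hm hm1 hm2

-- ===== VERDICT (by name: the statement is the Claim_ definition above) =====
theorem TwoDArray_spec : Claim_equal_TwoDArray := by
  intro sum limit _
  unfold Spec_TwoDArray TwoDArray TwoDArray_alt
  rw [foldl_append_map, List.nil_append]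
  apply List.map_congr_left
  intro i hi
  rw [PySem.List.mem_pyRange_neg_one] at hi
  have h1 : 1 ≤ i := by omega
  have h2 : i ≤ limit := hi.2
  rw [sieveOuter_getD limit 2 _ (by norm_num) (by simp) i h1 h2]
  rw [List.getD_eq_getElem?_getD]
  rw [List.getElem?_replicate]
  have : i.toNat < (limit + 1).toNat := by omega
  simp only [this, if_pos]
  have hl := levels_pow limit 1 i i (by norm_num) (by ring) h1 h2
  norm_num at hl
  simp [hl]
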